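-- pv_equiv track=rewrite | github.com/jinxin0924/Algorithms-Design-and-Analysis | maximum_permutation.py | naive_max_perm
-- ===== SOURCE A (Python) =====
-- def naive_max_perm(M, A=None):
--     if A is None:
--         A = set(range(len(M)))
--     if len(A) == 1:
--         return A
--     B = set(M[i] for i in A)
--     C=A- B
--     if C:
--         A.remove(C.pop())
--         naive_max_perm(M, A)
--     return A
-- ===== SOURCE B (Python) =====
-- def naive_max_perm(M, A=None):
--     if A is None:
--         A = set(range(len(M)))
--     if len(A) == 1:
--         return A
--     count = {i: 0 for i in A}          # referrers of i among A
--     for i in A: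
--         v = M[i]
--         if v in count:
--             count[v] += 1
--     stack = [i for i in A if count[i] == 0]
--     alive = set(A)
--     while stack:
--         i = stack.pop()
--         alive.discard(i)
--         v = M[i]
--         if v in count:
--             count[v] -= 1
--             if count[v] == 0 and v in alive:
--                 stack.append(v)
--     return alive
-- ===== Notes on version B (the rewrite author's own statement) =====
-- stated objective: alternative
-- what changed: Replaces the recursive one-removal-per-level rescan (which rebuilds the whole referenced-value set B on every call) with a single in-degree counting pass plus a worklist of unreferenced elements whose counts are decremented on removal.
-- outside the precondition, e.g. on naive_max_perm([5, 5, 5], None): A returns {2}, B returns set(); on naive_max_perm([7, 6, 1], None): A returns {1}, B returns set()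
import Mathlib
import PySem

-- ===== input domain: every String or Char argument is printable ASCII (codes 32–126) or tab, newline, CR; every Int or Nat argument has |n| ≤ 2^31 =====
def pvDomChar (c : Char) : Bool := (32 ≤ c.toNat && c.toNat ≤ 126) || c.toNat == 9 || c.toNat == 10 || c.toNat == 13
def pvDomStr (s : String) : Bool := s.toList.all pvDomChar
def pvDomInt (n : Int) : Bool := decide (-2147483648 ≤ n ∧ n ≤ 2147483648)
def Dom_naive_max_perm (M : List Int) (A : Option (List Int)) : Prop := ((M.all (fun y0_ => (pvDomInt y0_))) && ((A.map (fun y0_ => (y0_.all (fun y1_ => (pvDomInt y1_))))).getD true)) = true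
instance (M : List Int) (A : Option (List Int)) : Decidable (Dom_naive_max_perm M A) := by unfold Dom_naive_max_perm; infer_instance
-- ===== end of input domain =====

-- B replaces A's remove-one-and-rescan recursion by an in-degree counting pass plus a worklist;
-- the equivalence is about the RETURN value (Python A mutates the argument set in place, B does not).

-- shared first line of both Pythons: A = set(range(len(M))) if A is None else the given set
def pvA0 (M : List Int) (A : Option (List Int)) : List Int :=
  match A with
  | none => PySem.Set.ofList (PySem.List.pyRange 0 (M.length : Int) 1)
  | some a => PySem.Set.ofList a

-- M[i]; the IndexError case (out-of-range i) is excluded by Pre_, so the default is never read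
def pvGet (M : List Int) (i : Int) : Int := PySem.List.pyGetD M i 0

-- ===== PORT A =====
-- fuel = |A| bounds the recursion depth (each call removes one element); it never runs out.
-- CPython's C.pop() returns an arbitrary element of C; the port takes C's first element —
-- on the inputs Pre_ admits the returned set does not depend on that choice.
def pvGoA (M : List Int) : Nat → List Int → List Int
  | 0, S => S
  | fuel+1, S =>
    if S.length = 1 then S
    else
      let B := PySem.Set.ofList (S.map (fun i => pvGet M i))   -- B = set(M[i] for i in A)
      let C := PySem.Set.diff S B                              -- C = A - B
      match C with
      | [] => S
      | c :: _ => pvGoA M fuel (PySem.Set.discard S c)         -- A.remove(C.pop()); recurse; return A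

def naive_max_perm (M : List Int) (A : Option (List Int)) : List Int :=
  let A0 := pvA0 M A
  pvGoA M A0.length A0

-- ===== PORT B =====
-- worklist loop of Source B; fuel = 2*|A|+1 bounds the iterations (each pop shrinks alive; each
-- element is pushed at most once); Python pushes/pops at the list's end, the port at the head —
-- the same LIFO discipline, and the returned set does not depend on the processing order.
def pvGoB (M : List Int) : Nat → PySem.Dict Int Int → List Int → PySem.Set Int → List Int
  | 0, _, _, alive => alive
  | fuel+1, count, stack, alive =>
    match stack with
    | [] => alive
    | i :: rest =>
      let alive' := PySem.Set.discard alive i                  -- alive.discard(i)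
      let v := pvGet M i
      if count.contains v then                                 -- if v in count:
        let count' := count.modify v 0 (· - 1)                 --   count[v] -= 1
        if count'.getD v 0 == 0 && alive'.contains v then      --   if count[v] == 0 and v in alive:
          pvGoB M fuel count' (v :: rest) alive'               --     stack.append(v)
        else
          pvGoB M fuel count' rest alive'
      else
        pvGoB M fuel count rest alive'

def naive_max_perm_alt (M : List Int) (A : Option (List Int)) : List Int :=
  let A0 := pvA0 M A
  if A0.length = 1 then A0
  else
    let count0 := A0.foldl (fun d i => d.insert i 0) (PySem.Dict.empty : PySem.Dict Int Int)        -- {i: 0 for i in A}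
    let count1 := A0.foldl (fun d i =>
        if d.contains (pvGet M i) then d.modify (pvGet M i) 0 (· + 1) else d) count0             -- count[M[i]] += 1 if M[i] in count
    let stack := A0.filter (fun i => count1.getD i 0 == 0)                   -- [i for i in A if count[i] == 0]
    pvGoB M (2 * A0.length + 1) count1 stack A0                              -- alive = set(A); while stack: …

-- ===== PRECONDITION & SPEC =====
-- T is a subset of A all of whose elements are referenced from within T
def pvClosed (M : List Int) (T : List Int) : Prop := ∀ x ∈ T, ∃ i ∈ T, pvGet M i = x

-- Pre_ excludes (a) inputs whose index set contains an invalid index, on which A raises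
-- IndexError, and (b) inputs with 2 or more indices but no nonempty self-referenced subset,
-- on which every index is eventually removable and the single survivor A returns is an
-- artefact of CPython's arbitrary set.pop order (B returns the empty set there).
def Pre_naive_max_perm (M : List Int) (A : Option (List Int)) : Prop :=
  (pvA0 M A).length ≤ 1 ∨
    ((∀ i ∈ pvA0 M A, PySem.Raise.InRange M.length i) ∧
     ∃ T ∈ (pvA0 M A).sublists, T ≠ [] ∧ pvClosed M T)

instance (M : List Int) (A : Option (List Int)) : Decidable (Pre_naive_max_perm M A) := by
  unfold Pre_naive_max_perm pvClosed; infer_instance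

def pvWitness_naive_max_perm : List Int × Option (List Int) := ([1, 0, 7], none)

def Spec_naive_max_perm (M : List Int) (A : Option (List Int)) (out : List Int) : Prop := out = naive_max_perm_alt M A
instance (M : List Int) (A : Option (List Int)) (out : List Int) : Decidable (Spec_naive_max_perm M A out) := by unfold Spec_naive_max_perm; infer_instance

-- ===== CLAIM (what is proved, stated in full; the proofs are below) =====
def Claim_equal_naive_max_perm : Prop := ∀ (M : List Int) (A : Option (List Int)), Dom_naive_max_perm M A → Pre_naive_max_perm M A → Spec_naive_max_perm M A (naive_max_perm M A)

-- ===== LEMMAS AND PROOFS =====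

-- Boolean forms of closedness and of "x lies in some nonempty closed subset of A0" (the core)
def closedB (M T : List Int) : Bool := T.all (fun x => T.any (fun i => pvGet M i == x))

def coreB (M A0 : List Int) (x : Int) : Bool :=
  A0.sublists.any (fun T => closedB M T && T.contains x)

lemma closedB_iff (M T : List Int) : closedB M T = true ↔ pvClosed M T := by
  simp [closedB, pvClosed]

lemma core_mem (M A0 : List Int) (x : Int) (h : coreB M A0 x = true) : x ∈ A0 := by
  simp only [coreB, List.any_eq_true, Bool.and_eq_true, List.mem_sublists] at h
  obtain ⟨T, hTs, _, hx⟩ := h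
  exact hTs.mem (by simpa using hx)

lemma core_ref (M A0 : List Int) (x : Int) (h : coreB M A0 x = true) :
    ∃ i, coreB M A0 i = true ∧ pvGet M i = x := by
  simp only [coreB, List.any_eq_true, Bool.and_eq_true, List.mem_sublists] at h
  obtain ⟨T, hTs, hcl, hx⟩ := h
  rw [closedB_iff] at hcl
  obtain ⟨i, hiT, hi⟩ := hcl x (by simpa using hx)
  refine ⟨i, ?_, hi⟩
  simp only [coreB, List.any_eq_true, Bool.and_eq_true, List.mem_sublists]
  exact ⟨T, hTs, by rw [closedB_iff]; exact fun y hy => hcl y hy, by simpa using hiT⟩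

lemma core_of_closed (M A0 T : List Int) (hsub : ∀ y ∈ T, y ∈ A0) (hcl : pvClosed M T)
    (x : Int) (hx : x ∈ T) : coreB M A0 x = true := by
  simp only [coreB, List.any_eq_true, Bool.and_eq_true, List.mem_sublists]
  refine ⟨A0.filter (fun y => decide (y ∈ T)), (List.filter_sublist (l := A0)), ?_, ?_⟩
  · rw [closedB_iff]
    intro y hy
    simp only [List.mem_filter, decide_eq_true_eq] at hy
    obtain ⟨i, hiT, hi⟩ := hcl y hy.2
    exact ⟨i, by simp [List.mem_filter, hiT, hsub i hiT], hi⟩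
  · simp [List.mem_filter, hx, hsub x hx]

-- counting references into x from the index set S
def refCnt (M S : List Int) (x : Int) : Nat := S.countP (fun i => pvGet M i == x)

lemma countP_discard (p : Int → Bool) :
    ∀ (l : List Int), l.Nodup → ∀ i ∈ l,
      l.countP p = (PySem.Set.discard l i).countP p + (if p i then 1 else 0) := by
  intro l
  induction l with
  | nil => intro _ i hi; cases hi
  | cons a t ih =>
    intro hnd i hi
    have hnd' := hnd.of_cons
    have hna : a ∉ t := (List.nodup_cons.mp hnd).1
    rcases List.mem_cons.mp hi with rfl | hi
    · -- i = a
      have hfil : PySem.Set.discard (i :: t) i = t.filter (fun y => !(y == i)) := by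
        simp [PySem.Set.discard]
      have ht : t.filter (fun y => !(y == i)) = t := by
        rw [List.filter_eq_self]
        intro y hy
        simp only [Bool.not_eq_eq_eq_not, Bool.not_true, beq_eq_false_iff_ne]
        exact fun h => hna (h ▸ hy)
      rw [hfil, ht, List.countP_cons]
    · -- i ∈ t
      have hia : ¬ (a == i) = true := by
        simp only [beq_iff_eq]
        rintro rfl; exact hna hi
      have hfil : PySem.Set.discard (a :: t) i = a :: PySem.Set.discard t i := by
        simp [PySem.Set.discard, hia]
      rw [hfil, List.countP_cons, List.countP_cons, ih hnd' i hi]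
      omega

lemma length_discard :
    ∀ (l : List Int), l.Nodup → ∀ i ∈ l,
      l.length = (PySem.Set.discard l i).length + 1 := by
  intro l hnd i hi
  have h := countP_discard (fun _ => true) l hnd i hi
  simpa [List.countP_true] using h

lemma filter_discard (p : Int → Bool) (l : List Int) (c : Int) (hc : p c = false) :
    (PySem.Set.discard l c).filter p = l.filter p := by
  unfold PySem.Set.discard
  rw [List.filter_filter]
  apply List.filter_congr
  intro x _
  by_cases hxc : x = c
  · subst hxc; simp [hc]
  · simp [hxc]

-- ===== A-side: the recursion returns exactly the elements of the core =====
lemma goA_eq (M A0 : List Int) (hne : ∃ x, coreB M A0 x = true) :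
    ∀ (fuel : Nat) (S : List Int), S.Nodup → (∀ y ∈ S, y ∈ A0) →
      (∀ x, coreB M A0 x = true → x ∈ S) → S.length ≤ fuel →
      pvGoA M fuel S = S.filter (coreB M A0) := by
  intro fuel
  induction fuel with
  | zero =>
    intro S _ _ _ hlen
    have hS : S = [] := List.eq_nil_of_length_eq_zero (Nat.le_zero.mp hlen)
    subst hS; rfl
  | succ fuel ih =>
    intro S hnd hsub hcore hlen
    by_cases hS1 : S.length = 1
    · -- the len(A) == 1 early return: the single element must be the (nonempty) core
      obtain ⟨x0, hx0⟩ := hne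
      have hx0S : x0 ∈ S := hcore x0 hx0
      match S, hS1 with
      | [a], _ =>
        have hax : x0 = a := by simpa using hx0S
        subst hax
        simp [pvGoA, List.filter, hx0]
    · rw [show pvGoA M (fuel+1) S
          = (if S.length = 1 then S
             else match PySem.Set.diff S (PySem.Set.ofList (S.map (fun i => pvGet M i))) with
                  | [] => S
                  | c :: _ => pvGoA M fuel (PySem.Set.discard S c)) from rfl,
        if_neg hS1]
      cases hC : PySem.Set.diff S (PySem.Set.ofList (S.map (fun i => pvGet M i))) with
      | nil =>
        -- C empty: S is closed, so every element is in the core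
        have hclosed : ∀ x ∈ S, ∃ i ∈ S, pvGet M i = x := by
          intro x hx
          have := List.filter_eq_nil_iff.mp hC x hx
          simp only [Bool.not_eq_eq_eq_not, Bool.not_true, Bool.not_eq_false] at this
          have hxB : x ∈ PySem.Set.ofList (S.map (fun i => pvGet M i)) := by
            simpa [PySem.Set.contains] using this
          rw [PySem.Set.mem_ofList] at hxB
          obtain ⟨i, hiS, hi⟩ := List.mem_map.mp hxB
          exact ⟨i, hiS, hi⟩
        have : ∀ x ∈ S, coreB M A0 x = true :=
          fun x hx => core_of_closed M A0 S hsub hclosed x hx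
        exact (List.filter_eq_self.mpr this).symm
      | cons c cs =>
        have hcC : c ∈ PySem.Set.diff S (PySem.Set.ofList (S.map (fun i => pvGet M i))) := by
          rw [hC]; exact List.mem_cons_self
        have hcS : c ∈ S := (List.mem_filter.mp hcC).1
        have hcnB : ¬ ∃ i ∈ S, pvGet M i = c := by
          intro ⟨i, hiS, hi⟩
          have := (List.mem_filter.mp hcC).2
          simp only [Bool.not_eq_eq_eq_not, Bool.not_true] at this
          have : c ∈ PySem.Set.ofList (S.map (fun j => pvGet M j)) := by
            rw [PySem.Set.mem_ofList]
            exact List.mem_map.mpr ⟨i, hiS, hi⟩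
          simp_all [PySem.Set.contains]
        have hcCore : coreB M A0 c = false := by
          by_contra h
          have h' : coreB M A0 c = true := by simpa using h
          obtain ⟨i, hic, hi⟩ := core_ref M A0 c h'
          exact hcnB ⟨i, hcore i hic, hi⟩
        have hlen' : (PySem.Set.discard S c).length ≤ fuel := by
          have := length_discard S hnd c hcS
          omega
        show pvGoA M fuel (PySem.Set.discard S c) = List.filter (coreB M A0) S
        rw [ih (PySem.Set.discard S c)
            (PySem.Set.nodup_discard S c hnd)
            (fun y hy => hsub y (PySem.Set.mem_discard S c y |>.mp hy).1)
            (fun x hx => (PySem.Set.mem_discard S c x).mpr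
              ⟨hcore x hx, fun he => by rw [he] at hx; rw [hx] at hcCore; cases hcCore⟩)
            hlen']
        exact filter_discard (coreB M A0) S c hcCore

-- ===== B-side: the worklist loop returns exactly the elements of the core =====
lemma goB_eq (M A0 : List Int) :
    ∀ (fuel : Nat) (count : PySem.Dict Int Int) (stack alive : List Int),
      alive.Nodup → (∀ y ∈ alive, y ∈ A0) →
      stack.Nodup → (∀ x ∈ stack, x ∈ alive) →
      (∀ v, count.contains v = decide (v ∈ A0)) →
      (∀ x ∈ A0, count.getD x 0 = (refCnt M alive x : Int)) →
      (∀ x ∈ stack, refCnt M alive x = 0) →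
      (∀ x ∈ alive, refCnt M alive x = 0 → x ∈ stack) →
      (∀ x, coreB M A0 x = true → x ∈ alive ∧ x ∉ stack) →
      stack.length + alive.length ≤ fuel →
      pvGoB M fuel count stack alive = alive.filter (coreB M A0) := by
  intro fuel
  induction fuel with
  | zero =>
    intro count stack alive _ _ _ _ _ _ _ _ _ hfuel
    have : alive = [] := List.eq_nil_of_length_eq_zero (by omega)
    subst this; rfl
  | succ fuel ih =>
    intro count stack alive hnd hsub hsnd hsal h5 h6 h7 h8 h9 hfuel
    cases stack with
    | nil =>
      show alive = alive.filter (coreB M A0)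
      have hclosed : ∀ x ∈ alive, ∃ j ∈ alive, pvGet M j = x := by
        intro x hx
        have hne : refCnt M alive x ≠ 0 := fun h0 => by cases h8 x hx h0
        have hpos : 0 < alive.countP (fun j => pvGet M j == x) := Nat.pos_of_ne_zero hne
        obtain ⟨j, hj, hjx⟩ := List.countP_pos_iff.mp hpos
        exact ⟨j, hj, by simpa using hjx⟩
      exact (List.filter_eq_self.mpr
        (fun x hx => core_of_closed M A0 alive hsub hclosed x hx)).symm
    | cons i rest =>
      have hiA : i ∈ alive := hsal i List.mem_cons_self
      have hiCore : coreB M A0 i = false := by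
        by_contra h
        exact (h9 i (by simpa using h)).2 List.mem_cons_self
      have hinr : i ∉ rest := (List.nodup_cons.mp hsnd).1
      have hrnd : rest.Nodup := (List.nodup_cons.mp hsnd).2
      have hnd' : (PySem.Set.discard alive i).Nodup := PySem.Set.nodup_discard alive i hnd
      have hsub' : ∀ y ∈ PySem.Set.discard alive i, y ∈ A0 :=
        fun y hy => hsub y ((PySem.Set.mem_discard alive i y).mp hy).1
      have hlen_d : alive.length = (PySem.Set.discard alive i).length + 1 :=
        length_discard alive hnd i hiA
      have hcntd : ∀ x, refCnt M alive x
          = refCnt M (PySem.Set.discard alive i) x + (if pvGet M i == x then 1 else 0) :=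
        fun x => countP_discard (fun j => pvGet M j == x) alive hnd i hiA
      have hrest_al : ∀ x ∈ rest, x ∈ PySem.Set.discard alive i := by
        intro x hx
        exact (PySem.Set.mem_discard alive i x).mpr
          ⟨hsal x (List.mem_cons_of_mem i hx), fun he => hinr (he ▸ hx)⟩
      have hrest0 : ∀ x ∈ rest, refCnt M (PySem.Set.discard alive i) x = 0 := by
        intro x hx
        have := h7 x (List.mem_cons_of_mem i hx)
        have hc := hcntd x
        omega
      have hi0 : refCnt M alive i = 0 := h7 i List.mem_cons_self
      -- the core survives the removal of i
      have hcore_al' : ∀ x, coreB M A0 x = true → x ∈ PySem.Set.discard alive i := by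
        intro x hx
        obtain ⟨hxal, hxns⟩ := h9 x hx
        exact (PySem.Set.mem_discard alive i x).mpr
          ⟨hxal, fun he => hxns (he ▸ List.mem_cons_self)⟩
      have hcore_ref' : ∀ x, coreB M A0 x = true →
          0 < refCnt M (PySem.Set.discard alive i) x := by
        intro x hx
        obtain ⟨j, hjc, hjx⟩ := core_ref M A0 x hx
        have hj' : j ∈ PySem.Set.discard alive i := hcore_al' j hjc
        exact List.countP_pos_iff.mpr ⟨j, hj', by simpa using hjx⟩
      show (if count.contains (pvGet M i) then
              if (count.modify (pvGet M i) 0 (· - 1)).getD (pvGet M i) 0 == 0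
                  && (PySem.Set.discard alive i).contains (pvGet M i) then
                pvGoB M fuel (count.modify (pvGet M i) 0 (· - 1)) (pvGet M i :: rest)
                  (PySem.Set.discard alive i)
              else
                pvGoB M fuel (count.modify (pvGet M i) 0 (· - 1)) rest
                  (PySem.Set.discard alive i)
            else pvGoB M fuel count rest (PySem.Set.discard alive i))
          = alive.filter (coreB M A0)
      by_cases hv : pvGet M i ∈ A0
      · rw [if_pos (by rw [h5]; simpa using hv)]
        have hgd : ∀ x ∈ A0, (count.modify (pvGet M i) 0 (· - 1)).getD x 0
            = (refCnt M (PySem.Set.discard alive i) x : Int) := by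
          intro x hx
          rw [PySem.Dict.getD_modify]
          by_cases hxv : x = pvGet M i
          · subst hxv
            rw [if_pos rfl, h6 _ hx]
            have := hcntd (pvGet M i)
            simp at this
            omega
          · rw [if_neg hxv, h6 x hx]
            have := hcntd x
            have hne : (pvGet M i == x) = false := by
              simp only [beq_eq_false_iff_ne]; exact fun h => hxv h.symm
            rw [hne] at this
            simp at this
            omega
        have hcont' : ∀ w, (count.modify (pvGet M i) 0 (· - 1)).contains w = decide (w ∈ A0) := by
          intro w
          rw [PySem.Dict.contains_modify]
          by_cases hw : (w == pvGet M i) = true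
          · rw [beq_iff_eq] at hw; subst hw
            simp [hv]
          · simp only [hw, Bool.false_or]
            exact h5 w
        have hvnr : pvGet M i ∉ rest := by
          intro hmem
          have := h7 (pvGet M i) (List.mem_cons_of_mem i hmem)
          have hc := hcntd (pvGet M i)
          simp at hc
          omega
        have hcond : ((count.modify (pvGet M i) 0 (· - 1)).getD (pvGet M i) 0 == 0
              && (PySem.Set.discard alive i).contains (pvGet M i))
            = (decide (refCnt M (PySem.Set.discard alive i) (pvGet M i) = 0)
              && decide (pvGet M i ∈ PySem.Set.discard alive i)) := by
          rw [hgd (pvGet M i) hv]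
          simp [PySem.Set.contains, beq_eq_decide, Int.natCast_eq_zero]
        by_cases hpush : refCnt M (PySem.Set.discard alive i) (pvGet M i) = 0
            ∧ pvGet M i ∈ PySem.Set.discard alive i
        · rw [hcond, if_pos (by simp [hpush.1, hpush.2])]
          rw [ih (count.modify (pvGet M i) 0 (· - 1)) (pvGet M i :: rest)
              (PySem.Set.discard alive i) hnd' hsub'
              (List.nodup_cons.mpr ⟨hvnr, hrnd⟩)
              (fun x hx => by
                rcases List.mem_cons.mp hx with rfl | hx
                · exact hpush.2
                · exact hrest_al x hx)
              hcont' hgd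
              (fun x hx => by
                rcases List.mem_cons.mp hx with rfl | hx
                · exact hpush.1
                · exact hrest0 x hx)
              (fun x hxal hx0 => by
                by_cases hxv : x = pvGet M i
                · subst hxv; exact List.mem_cons_self
                · refine List.mem_cons_of_mem _ ?_
                  have hxa : x ∈ alive := ((PySem.Set.mem_discard alive i x).mp hxal).1
                  have hxi : x ≠ i := ((PySem.Set.mem_discard alive i x).mp hxal).2
                  have hc := hcntd x
                  have hne : (pvGet M i == x) = false := by
                    simp only [beq_eq_false_iff_ne]; exact fun h => hxv h.symm
                  rw [hne] at hc
                  simp at hc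
                  have : refCnt M alive x = 0 := by omega
                  rcases List.mem_cons.mp (h8 x hxa this) with h' | h'
                  · exact absurd h' hxi
                  · exact h')
              (fun x hx => by
                refine ⟨hcore_al' x hx, ?_⟩
                intro hmem
                rcases List.mem_cons.mp hmem with rfl | hmem
                · exact (Nat.pos_iff_ne_zero.mp (hcore_ref' _ hx)) hpush.1
                · exact (h9 x hx).2 (List.mem_cons_of_mem i hmem))
              (by simp only [List.length_cons] at hfuel ⊢; omega)]
          exact filter_discard (coreB M A0) alive i hiCore
        · rw [hcond, if_neg (by
            intro h
            rw [Bool.and_eq_true, decide_eq_true_eq, decide_eq_true_eq] at h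
            exact hpush ⟨h.1, h.2⟩)]
          rw [ih (count.modify (pvGet M i) 0 (· - 1)) rest
              (PySem.Set.discard alive i) hnd' hsub' hrnd hrest_al hcont' hgd hrest0
              (fun x hxal hx0 => by
                by_cases hxv : x = pvGet M i
                · subst hxv
                  exact absurd ⟨hx0, hxal⟩ hpush
                · have hxa : x ∈ alive := ((PySem.Set.mem_discard alive i x).mp hxal).1
                  have hxi : x ≠ i := ((PySem.Set.mem_discard alive i x).mp hxal).2
                  have hc := hcntd x
                  have hne : (pvGet M i == x) = false := by
                    simp only [beq_eq_false_iff_ne]; exact fun h => hxv h.symm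
                  rw [hne] at hc
                  simp at hc
                  have : refCnt M alive x = 0 := by omega
                  rcases List.mem_cons.mp (h8 x hxa this) with h' | h'
                  · exact absurd h' hxi
                  · exact h')
              (fun x hx => ⟨hcore_al' x hx,
                fun hmem => (h9 x hx).2 (List.mem_cons_of_mem i hmem)⟩)
              (by simp only [List.length_cons] at hfuel; omega)]
          exact filter_discard (coreB M A0) alive i hiCore
      · rw [if_neg (by rw [h5]; simpa using hv)]
        rw [ih count rest (PySem.Set.discard alive i) hnd' hsub' hrnd hrest_al h5
            (fun x hx => by
              rw [h6 x hx]
              have hc := hcntd x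
              have hne : (pvGet M i == x) = false := by
                simp only [beq_eq_false_iff_ne]
                intro h; exact hv (h ▸ hx)
              rw [hne] at hc
              simp at hc
              omega)
            hrest0
            (fun x hxal hx0 => by
              have hxa : x ∈ alive := ((PySem.Set.mem_discard alive i x).mp hxal).1
              have hxi : x ≠ i := ((PySem.Set.mem_discard alive i x).mp hxal).2
              have hc := hcntd x
              have hne : (pvGet M i == x) = false := by
                simp only [beq_eq_false_iff_ne]
                intro h; exact hv (h ▸ hsub x hxa)
              rw [hne] at hc
              simp at hc
              have : refCnt M alive x = 0 := by omega
              rcases List.mem_cons.mp (h8 x hxa this) with h' | h'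
              · exact absurd h' hxi
              · exact h')
            (fun x hx => ⟨hcore_al' x hx,
              fun hmem => (h9 x hx).2 (List.mem_cons_of_mem i hmem)⟩)
            (by simp only [List.length_cons] at hfuel; omega)]
        exact filter_discard (coreB M A0) alive i hiCore

-- the two counting passes of B
lemma count0_contains (A0 : List Int) (v : Int) :
    (A0.foldl (fun d i => d.insert i 0) (PySem.Dict.empty : PySem.Dict Int Int)).contains v = decide (v ∈ A0) := by
  have h := PySem.Dict.keys_foldl_insert (ν := Int) A0 (fun _ _ => 0) PySem.Dict.empty
  rw [PySem.Dict.contains_eq_decide_mem_keys, h, PySem.Dict.keys_empty,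
    PySem.Set.update_nil_left]
  simp [PySem.Set.mem_ofList]

lemma count0_getD (A0 : List Int) (x : Int) :
    (A0.foldl (fun d i => d.insert i 0) (PySem.Dict.empty : PySem.Dict Int Int)).getD x 0 = 0 := by
  have : ∀ (l : List Int) (d : PySem.Dict Int Int), (∀ y, d.getD y 0 = 0) →
      (l.foldl (fun d i => d.insert i 0) d).getD x 0 = 0 := by
    intro l
    induction l with
    | nil => intro d hd; exact hd x
    | cons a t ih =>
      intro d hd
      refine ih _ (fun y => ?_)
      rw [PySem.Dict.getD_insert]
      split <;> simp [hd]
  exact this A0 PySem.Dict.empty (fun y => by simp [PySem.Dict.getD_empty])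

lemma count1_contains (M : List Int) (A0 : List Int) :
    ∀ (l : List Int) (d : PySem.Dict Int Int), (∀ v, d.contains v = decide (v ∈ A0)) →
      ∀ v, (l.foldl (fun d i =>
          if d.contains (pvGet M i) then d.modify (pvGet M i) 0 (· + 1) else d) d).contains v = decide (v ∈ A0) := by
  intro l
  induction l with
  | nil => intro d hd v; exact hd v
  | cons a t ih =>
    intro d hd v
    simp only [List.foldl_cons]
    by_cases hc : d.contains (pvGet M a) = true
    · rw [if_pos hc]
      refine ih _ (fun w => ?_) v
      rw [PySem.Dict.contains_modify]
      by_cases hw : (w == pvGet M a) = true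
      · simp only [hw, Bool.true_or]
        rw [beq_iff_eq] at hw; subst hw
        rw [← hd]; exact hc.symm
      · simp [hw, hd]
    · rw [if_neg hc]
      exact ih _ hd v

lemma count1_getD (M : List Int) (A0 : List Int) :
    ∀ (l : List Int) (d : PySem.Dict Int Int), (∀ v, d.contains v = decide (v ∈ A0)) →
      ∀ x ∈ A0, (l.foldl (fun d i =>
          if d.contains (pvGet M i) then d.modify (pvGet M i) 0 (· + 1) else d) d).getD x 0
        = d.getD x 0 + (refCnt M l x : Int) := by
  intro l
  induction l with
  | nil => intro d hd x hx; simp [refCnt]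
  | cons a t ih =>
    intro d hd x hx
    simp only [List.foldl_cons]
    have hcnt : refCnt M (a :: t) x = refCnt M t x + (if (pvGet M a == x) then 1 else 0) := by
      simp only [refCnt, List.countP_cons]
    by_cases hc : d.contains (pvGet M a) = true
    · rw [if_pos hc]
      have hd' : ∀ w, (d.modify (pvGet M a) 0 (· + 1)).contains w = decide (w ∈ A0) := by
        intro w
        rw [PySem.Dict.contains_modify]
        by_cases hw : (w == pvGet M a) = true
        · rw [beq_iff_eq] at hw; subst hw
          simp only [BEq.rfl, Bool.true_or]
          rw [← hd]; exact hc.symm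
        · simp [hw, hd]
      rw [ih _ hd' x hx, PySem.Dict.getD_modify]
      by_cases hxa : x = pvGet M a
      · subst hxa
        rw [if_pos rfl, hcnt]
        simp only [BEq.rfl, if_true]
        push_cast
        ring
      · rw [if_neg hxa, hcnt]
        have : (pvGet M a == x) = false := by simp [beq_eq_false_iff_ne]; exact fun h => hxa h.symm
        simp [this]
    · rw [if_neg hc]
      rw [ih _ hd x hx, hcnt]
      have hva : pvGet M a ∉ A0 := by
        intro hmem
        rw [hd (pvGet M a)] at hc
        simp [hmem] at hc
      have : (pvGet M a == x) = false := by
        simp only [beq_eq_false_iff_ne]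
        intro h; exact hva (h ▸ hx)
      simp [this]

lemma nodup_pvA0 (M : List Int) (A : Option (List Int)) : (pvA0 M A).Nodup := by
  cases A <;> exact PySem.Set.nodup_ofList _

-- ===== VERDICT (by name: the statement is the Claim_ definition above) =====
theorem naive_max_perm_spec : Claim_equal_naive_max_perm := by
  intro M A _ hpre
  unfold Spec_naive_max_perm
  have hA : naive_max_perm M A = pvGoA M (pvA0 M A).length (pvA0 M A) := rfl
  have hB : naive_max_perm_alt M A =
      (if (pvA0 M A).length = 1 then pvA0 M A
       else
        pvGoB M (2 * (pvA0 M A).length + 1)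
          ((pvA0 M A).foldl (fun d i =>
              if d.contains (pvGet M i) then d.modify (pvGet M i) 0 (· + 1) else d)
            ((pvA0 M A).foldl (fun d i => d.insert i 0) (PySem.Dict.empty : PySem.Dict Int Int)))
          ((pvA0 M A).filter (fun i =>
            ((pvA0 M A).foldl (fun d i =>
                if d.contains (pvGet M i) then d.modify (pvGet M i) 0 (· + 1) else d)
              ((pvA0 M A).foldl (fun d i => d.insert i 0) (PySem.Dict.empty : PySem.Dict Int Int))).getD i 0 == 0))
          (pvA0 M A)) := rfl
  rcases Nat.lt_or_ge (pvA0 M A).length 2 with hlt | hge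
  · -- |A0| ≤ 1 : both sides return A0 unchanged
    interval_cases h : (pvA0 M A).length
    · -- A0 = []
      have h0 : pvA0 M A = [] := List.eq_nil_of_length_eq_zero h
      rw [hA, hB, h0]
      rfl
    · -- |A0| = 1: both take the early return
      rw [hA, hB, if_pos rfl]
      show (if (pvA0 M A).length = 1 then pvA0 M A
            else match PySem.Set.diff (pvA0 M A) (PySem.Set.ofList ((pvA0 M A).map (fun i => pvGet M i))) with
                 | [] => pvA0 M A
                 | c :: _ => pvGoA M 0 (PySem.Set.discard (pvA0 M A) c)) = pvA0 M A
      rw [if_pos h]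
  · -- |A0| ≥ 2 : Pre_ supplies a nonempty closed subset; both sides compute the core
    have hpre' := hpre
    unfold Pre_naive_max_perm at hpre'
    rcases hpre' with hle | ⟨_, T, hTs, hTne, hTcl⟩
    · omega
    · have hTsub : T.Sublist (pvA0 M A) := List.mem_sublists.mp hTs
      have hTmem : ∀ y ∈ T, y ∈ pvA0 M A := fun y hy => hTsub.mem hy
      have hx0 : coreB M (pvA0 M A) (T.head hTne) = true :=
        core_of_closed M (pvA0 M A) T hTmem hTcl _ (List.head_mem hTne)
      have hne : ∃ x, coreB M (pvA0 M A) x = true := ⟨_, hx0⟩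
      -- A-side
      have hAres : naive_max_perm M A = (pvA0 M A).filter (coreB M (pvA0 M A)) := by
        rw [hA]
        exact goA_eq M (pvA0 M A) hne (pvA0 M A).length (pvA0 M A)
          (nodup_pvA0 M A) (fun y hy => hy)
          (fun x hx => core_mem M (pvA0 M A) x hx) le_rfl
      -- B-side
      have hc0 := count0_contains (pvA0 M A)
      have hc1cont := count1_contains M (pvA0 M A) (pvA0 M A) _ hc0
      have hc1getD : ∀ x ∈ pvA0 M A,
          ((pvA0 M A).foldl (fun d i =>
              if d.contains (pvGet M i) then d.modify (pvGet M i) 0 (· + 1) else d)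
            ((pvA0 M A).foldl (fun d i => d.insert i 0) (PySem.Dict.empty : PySem.Dict Int Int))).getD x 0
          = (refCnt M (pvA0 M A) x : Int) := by
        intro x hx
        rw [count1_getD M (pvA0 M A) (pvA0 M A) _ hc0 x hx, count0_getD]
        omega
      have hstack7 : ∀ x ∈ (pvA0 M A).filter (fun i =>
            ((pvA0 M A).foldl (fun d i =>
                if d.contains (pvGet M i) then d.modify (pvGet M i) 0 (· + 1) else d)
              ((pvA0 M A).foldl (fun d i => d.insert i 0) (PySem.Dict.empty : PySem.Dict Int Int))).getD i 0 == 0),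
          refCnt M (pvA0 M A) x = 0 := by
        intro x hx
        obtain ⟨hxA, hx0'⟩ := List.mem_filter.mp hx
        rw [hc1getD x hxA] at hx0'
        simpa [beq_eq_decide, Int.natCast_eq_zero] using hx0'
      have hBres : naive_max_perm_alt M A = (pvA0 M A).filter (coreB M (pvA0 M A)) := by
        rw [hB, if_neg (by omega)]
        refine goB_eq M (pvA0 M A) _ _ _ _ (nodup_pvA0 M A) (fun y hy => hy)
          ((nodup_pvA0 M A).filter _)
          (fun x hx => (List.mem_filter.mp hx).1)
          hc1cont hc1getD hstack7
          (fun x hx h0 => List.mem_filter.mpr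
            ⟨hx, by rw [hc1getD x hx, h0]; simp⟩)
          (fun x hx => ?_)
          (by have := List.length_filter_le (fun i =>
                ((pvA0 M A).foldl (fun d i =>
                    if d.contains (pvGet M i) then d.modify (pvGet M i) 0 (· + 1) else d)
                  ((pvA0 M A).foldl (fun d i => d.insert i 0) (PySem.Dict.empty : PySem.Dict Int Int))).getD i 0 == 0)
                (pvA0 M A)
              omega)
        refine ⟨core_mem M (pvA0 M A) x hx, fun hmem => ?_⟩
        obtain ⟨j, hjc, hjx⟩ := core_ref M (pvA0 M A) x hx
        have : 0 < refCnt M (pvA0 M A) x :=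
          List.countP_pos_iff.mpr ⟨j, core_mem M (pvA0 M A) j hjc, by simpa using hjx⟩
        have h0 := hstack7 x hmem
        omega
      rw [hAres, hBres]
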